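-- pv_equiv track=rewrite | github.com/protomaps/PMTiles | python/pmtiles/pmtiles/tile.py | tileid_to_zxy
-- ===== SOURCE A (Python) =====
-- def rotate(n, x, y, rx, ry):
--     if ry == 0:
--         if rx != 0:
--             x = n - 1 - x
--             y = n - 1 - y
--         x, y = y, x
--     return x, y
--
-- def tileid_to_zxy(tile_id):
--     z = ((3 * tile_id + 1).bit_length() - 1) // 2
--     if z >= 32:
--         raise OverflowError("tile zoom exceeds 64-bit limit")
--     acc = ((1 << (z * 2)) - 1) // 3
--     pos = tile_id - acc
--     x = 0
--     y = 0
--     s = 1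
--     n = 1 << z
--     while s < n:
--         rx = (pos // 2) & s
--         ry = (pos ^ rx) & s
--         (x, y) = rotate(s, x, y, rx, ry)
--         x += rx
--         y += ry
--         pos >>= 1
--         s <<= 1
--     return (z, x, y)
-- ===== SOURCE B (Python) =====
-- _HIL = (
--     ((0, 0, 1), (0, 1, 0), (1, 1, 0), (1, 0, 2)),
--     ((0, 0, 0), (1, 0, 1), (1, 1, 1), (0, 1, 3)),
--     ((1, 1, 3), (0, 1, 2), (0, 0, 2), (1, 0, 0)),
--     ((1, 1, 2), (1, 0, 3), (0, 0, 3), (0, 1, 1)),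
-- )
--
-- def _decode(z, pos, state):
--     # MSB-first state-machine decode: emit one x-bit and one y-bit per level
--     if z == 0:
--         return (0, 0)
--     bx, by, state2 = _HIL[state][(pos >> (2 * (z - 1))) & 3]
--     sx, sy = _decode(z - 1, pos, state2)
--     s = 1 << (z - 1)
--     return (bx * s + sx, by * s + sy)
--
-- def tileid_to_zxy(tile_id):
--     # find the zoom level by accumulating the tile counts of the levels
--     z = 0
--     acc = 0
--     while acc + (1 << (2 * z)) <= tile_id:
--         acc += 1 << (2 * z)
--         z += 1
--     if z >= 32:
--         raise OverflowError("tile zoom exceeds 64-bit limit")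
--     x, y = _decode(z, tile_id - acc, 0)
--     return (z, x, y)
-- ===== Notes on version B (the rewrite author's own statement) =====
-- stated objective: alternative
-- what changed: B decodes the Hilbert index MSB-first with a four-state orientation machine (a lookup table emitting one x-bit and one y-bit per level), instead of A's LSB-first loop that repeatedly rotates/reflects the accumulated coordinates; the zoom level comes from an accumulating per-level tile-count scan instead of A's bit_length closed form.
-- outside the precondition, e.g. on tileid_to_zxy(-5): A returns (1, 1, 1), B returns (0, 0, 0)
import Mathlib
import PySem

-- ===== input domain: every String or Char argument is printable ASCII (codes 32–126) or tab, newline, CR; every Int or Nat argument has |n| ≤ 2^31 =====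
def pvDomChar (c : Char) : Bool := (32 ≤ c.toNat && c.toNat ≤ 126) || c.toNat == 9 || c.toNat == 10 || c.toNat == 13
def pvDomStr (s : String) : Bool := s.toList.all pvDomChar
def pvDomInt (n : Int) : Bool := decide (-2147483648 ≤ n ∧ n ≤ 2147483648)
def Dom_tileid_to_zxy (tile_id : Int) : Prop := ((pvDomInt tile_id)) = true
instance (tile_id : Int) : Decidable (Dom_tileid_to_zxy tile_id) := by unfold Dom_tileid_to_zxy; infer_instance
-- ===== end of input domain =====

-- B decodes the Hilbert index MSB-first with a four-state orientation machine (table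
-- lookup, one x-bit and one y-bit per level) instead of A's LSB-first rotate/reflect loop,
-- and finds the zoom by an accumulating per-level scan; objective: alternative (same cost).

-- ===== PORT A =====
def rotate (n x y rx ry : Int) : Int × Int :=
  if ry = 0 then
    let xy := if rx ≠ 0 then (n - 1 - x, n - 1 - y) else (x, y)
    (xy.2, xy.1)
  else (x, y)

def hilbertLoop (n x y pos s : Int) : Int × Int :=
  if _h1 : s < n then
    if _h2 : 1 ≤ s then  -- totality guard only: s starts at 1 and doubles, so 1 ≤ s whenever reached
      let rx := PySem.Int.band (PySem.Int.floordiv pos 2) s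
      let ry := PySem.Int.band (PySem.Int.bxor pos rx) s
      let xy := rotate s x y rx ry
      hilbertLoop n (xy.1 + rx) (xy.2 + ry) (pos >>> (1:Nat)) (s <<< (1:Nat))
    else (x, y)
  else (x, y)
  termination_by (n - s).toNat
  decreasing_by
    have h : s <<< (1:Nat) = s * 2 := by rw [Int.shiftLeft_eq]; ring
    omega

def tileid_to_zxy (tile_id : Int) : Int × Int × Int :=
  let z : Int := PySem.Int.floordiv ((PySem.Int.bitLength (3 * tile_id + 1) : Int) - 1) 2
  if 32 ≤ z then
    (0, 0, 0)  -- Python raises OverflowError here; these inputs are excluded by Pre_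
  else
    -- z ≥ 0 always (bit_length ≥ 1 since 3*tile_id+1 ≠ 0), so .toNat is exact for Python's shifts
    let acc : Int := PySem.Int.floordiv ((1 <<< (z * 2).toNat) - 1) 3
    let pos := tile_id - acc
    let xy := hilbertLoop (1 <<< z.toNat) 0 0 pos 1
    (z, xy.1, xy.2)

-- ===== PORT B =====
-- _HIL[state][q] of Source B: a nested table lookup, written out as the finite case function it is
def hilTable (st q : Int) : Int × Int × Int :=
  if st = 0 then
    (if q = 0 then (0, 0, 1) else if q = 1 then (0, 1, 0) else if q = 2 then (1, 1, 0) else (1, 0, 2))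
  else if st = 1 then
    (if q = 0 then (0, 0, 0) else if q = 1 then (1, 0, 1) else if q = 2 then (1, 1, 1) else (0, 1, 3))
  else if st = 2 then
    (if q = 0 then (1, 1, 3) else if q = 1 then (0, 1, 2) else if q = 2 then (0, 0, 2) else (1, 0, 0))
  else
    (if q = 0 then (1, 1, 2) else if q = 1 then (1, 0, 3) else if q = 2 then (0, 0, 3) else (0, 1, 1))

def msbDecode (z : Nat) (pos st : Int) : Int × Int :=
  match z with
  | 0 => (0, 0)
  | z + 1 =>
    let t := hilTable st (PySem.Int.band (pos >>> (2 * z : Nat)) 3)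
    let sub := msbDecode z pos t.2.2
    let s : Int := 1 <<< (z : Nat)
    (t.1 * s + sub.1, t.2.1 * s + sub.2)

def levelScan (tile_id : Int) (z : Nat) (acc : Int) : Nat × Int :=
  if acc + (1 <<< (2 * z)) ≤ tile_id then
    levelScan tile_id (z + 1) (acc + (1 <<< (2 * z)))
  else (z, acc)
  termination_by (tile_id - acc).toNat
  decreasing_by
    have h : (0:Nat) < 1 <<< (2 * z) := by rw [Nat.one_shiftLeft]; positivity
    omega

def tileid_to_zxy_alt (tile_id : Int) : Int × Int × Int :=
  let za := levelScan tile_id 0 0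
  if 32 ≤ za.1 then
    (0, 0, 0)  -- Python raises OverflowError here; these inputs are excluded by Pre_
  else
    let xy := msbDecode za.1 (tile_id - za.2) 0
    ((za.1 : Int), xy.1, xy.2)

-- ===== PRECONDITION & SPEC =====
-- Pre_ excludes negative tile ids (outside the function's natural domain — ids are nonnegative),
-- where A's value is an artefact of bit_length reading the absolute value, and the huge ids
-- (3*tile_id+1 ≥ 2^64, far outside Dom) on which both A and B raise OverflowError.
def Pre_tileid_to_zxy (tile_id : Int) : Prop :=
  0 ≤ tile_id ∧ 3 * tile_id + 1 < 18446744073709551616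
instance (tile_id : Int) : Decidable (Pre_tileid_to_zxy tile_id) := by
  unfold Pre_tileid_to_zxy; infer_instance

def pvWitness_tileid_to_zxy : Int := 5

def Spec_tileid_to_zxy (tile_id : Int) (out : Int × Int × Int) : Prop := out = tileid_to_zxy_alt tile_id
instance (tile_id : Int) (out : Int × Int × Int) : Decidable (Spec_tileid_to_zxy tile_id out) := by unfold Spec_tileid_to_zxy; infer_instance

-- ===== CLAIM (what is proved, stated in full; the proofs are below) =====
def Claim_equal_tileid_to_zxy : Prop := ∀ (tile_id : Int), Dom_tileid_to_zxy tile_id → Pre_tileid_to_zxy tile_id → Spec_tileid_to_zxy tile_id (tileid_to_zxy tile_id)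

-- ===== LEMMAS AND PROOFS =====

theorem shiftl_nat_int (m : Nat) : ((1 <<< m : Nat) : Int) = 2 ^ m := by
  rw [Nat.one_shiftLeft]; push_cast; ring

-- B's zoom scan returns the unique Z with 4^Z ≤ 3t+1 < 4^(Z+1), with acc = (4^Z-1)/3.
theorem levelScan_eq (t : Int) (Z : Nat) (h4a : (4:Int)^Z ≤ 3*t+1) (h4b : 3*t+1 < (4:Int)^(Z+1)) :
    ∀ (d z : Nat) (a : Int), Z - z = d → z ≤ Z → 3*a + 1 = (4:Int)^z →
    levelScan t z a = (Z, ((4:Int)^Z - 1) / 3) := by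
  intro d
  induction d with
  | zero =>
    intro z a hd hz ha
    have hzZ : z = Z := by omega
    rw [hzZ] at ha
    rw [hzZ, levelScan, if_neg]
    · have h3a : (4:Int)^Z - 1 = 3 * a := by linarith
      rw [h3a, Int.mul_ediv_cancel_left a (by norm_num : (3:Int) ≠ 0)]
    · rw [shiftl_nat_int, pow_mul]
      have h41 : (4:Int)^(Z+1) = 4 * 4^Z := by ring
      have h42 : ((2:Int)^2)^Z = 4^Z := by norm_num
      rw [h42]
      omega
  | succ d ih =>
    intro z a hd hz ha
    have hzZ : z < Z := by omega
    rw [levelScan, if_pos]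
    · rw [shiftl_nat_int, pow_mul]
      apply ih (z+1) _ (by omega) (by omega)
      have : ((2:Int)^2)^z = 4^z := by norm_num
      rw [this, pow_succ]
      linarith
    · rw [shiftl_nat_int, pow_mul]
      have h4m : (4:Int)^(z+1) ≤ 4^Z := pow_le_pow_right₀ (by norm_num) (by omega)
      have h41 : (4:Int)^(z+1) = 4 * 4^z := by ring
      have h42 : ((2:Int)^2)^z = 4^z := by norm_num
      rw [h42]
      omega

-- proof-side abstraction of one LSB step of A's loop (used only to characterise A)
def quadStep (st : Int × Int × Int) (k : Nat) : Int × Int × Int :=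
  let s : Int := 1 <<< k
  let q := PySem.Int.band st.2.2 3
  let pos' := st.2.2 >>> (2:Nat)
  if q = 0 then (st.2.1, st.1, pos')
  else if q = 1 then (st.1, st.2.1 + s, pos')
  else if q = 2 then (st.1 + s, st.2.1 + s, pos')
  else (2 * s - 1 - st.2.1, s - 1 - st.1, pos')

-- unfolding lemmas for A's loop
theorem hilbertLoop_stop (n x y pos s : Int) (h : ¬ s < n) : hilbertLoop n x y pos s = (x, y) := by
  rw [hilbertLoop]; simp [h]

theorem hilbertLoop_step (n x y pos s : Int) (h1 : s < n) (h2 : 1 ≤ s) :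
    hilbertLoop n x y pos s =
      (let rx := PySem.Int.band (PySem.Int.floordiv pos 2) s
       let ry := PySem.Int.band (PySem.Int.bxor pos rx) s
       let xy := rotate s x y rx ry
       hilbertLoop n (xy.1 + rx) (xy.2 + ry) (pos >>> (1:Nat)) (s <<< (1:Nat))) := by
  conv_lhs => rw [hilbertLoop]
  simp [h1, h2]

-- bit facts used by the step comparison
theorem mod4_testBit (m : Nat) : m % 4 = 2 * (m.testBit 1).toNat + (m.testBit 0).toNat := by
  simp only [Nat.testBit_eq_decide_div_mod_eq, pow_zero, pow_one, Nat.div_one]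
  by_cases h1 : m / 2 % 2 = 1 <;> by_cases h0 : m % 2 = 1 <;> simp [h1, h0] <;> omega

theorem and_three (m : Nat) : m &&& 3 = m % 4 := by
  have h := Nat.and_two_pow_sub_one_eq_mod m 2
  norm_num at h
  exact h

theorem testBit_toNat_pow (b : Bool) (k : Nat) : (b.toNat * 2 ^ k).testBit k = b := by
  cases b <;> simp [Nat.testBit_two_pow_self]

-- A's loop equals the LSB-first fold of quadStep
theorem decode_eq (z : Nat) :
    ∀ (d k : Nat) (x y : Int) (p : Nat), z - k = d → k ≤ z →
    hilbertLoop (1 <<< z) x y ((p >>> k : Nat) : Int) (1 <<< k) =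
      (((List.range' k (z - k)).foldl quadStep (x, y, ((p >>> (2*k) : Nat) : Int))).1,
       ((List.range' k (z - k)).foldl quadStep (x, y, ((p >>> (2*k) : Nat) : Int))).2.1) := by
  intro d
  induction d with
  | zero =>
    intro k x y p hd hk
    have hkz : k = z := by omega
    subst hkz
    rw [hilbertLoop_stop _ _ _ _ _ (lt_irrefl _)]
    simp
  | succ d ih =>
    intro k x y p hd hk
    have hkz : k < z := by omega
    rw [hilbertLoop_step _ _ _ _ _
      (by rw [shiftl_nat_int, shiftl_nat_int]; exact pow_lt_pow_right₀ (by norm_num) hkz)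
      (by rw [shiftl_nat_int]
          have := pow_pos (show (0:Int) < 2 by norm_num) k
          omega)]
    have hcast2 : ((1 <<< k : Nat) : Int) = ((2 ^ k : Nat) : Int) := by rw [Nat.one_shiftLeft]
    have hfd : PySem.Int.floordiv ((p >>> k : Nat) : Int) 2 = ((p >>> (k+1) : Nat) : Int) := by
      rw [show p >>> (k+1) = p >>> k / 2 from Eq.symm (Nat.shiftRight_succ p k)]
      exact_mod_cast PySem.Int.floordiv_natCast (p >>> k) 2
    have hrx : PySem.Int.band (PySem.Int.floordiv ((p >>> k : Nat) : Int) 2) ((1 <<< k : Nat) : Int)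
        = (((p.testBit (2*k+1)).toNat * 2 ^ k : Nat) : Int) := by
      rw [hfd, hcast2, PySem.Int.band_natCast]
      congr 1
      rw [Nat.and_two_pow, Nat.testBit_shiftRight, show k + 1 + k = 2*k+1 from by omega]
    have hry : PySem.Int.band (PySem.Int.bxor ((p >>> k : Nat) : Int) (((p.testBit (2*k+1)).toNat * 2 ^ k : Nat) : Int)) ((1 <<< k : Nat) : Int)
        = (((p.testBit (2*k) != p.testBit (2*k+1)).toNat * 2 ^ k : Nat) : Int) := by
      rw [hcast2, PySem.Int.bxor_natCast, PySem.Int.band_natCast]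
      congr 1
      rw [Nat.and_two_pow, Nat.testBit_xor, Nat.testBit_shiftRight, testBit_toNat_pow,
        show k + k = 2*k from by omega]
    have hps : (((p >>> k : Nat) : Int)) >>> (1:Nat) = ((p >>> (k+1) : Nat) : Int) := by
      rw [Int.natCast_shiftRight, Int.natCast_shiftRight, ← Int.shiftRight_add]
    have hss : ((1 <<< k : Nat) : Int) <<< (1:Nat) = ((1 <<< (k+1) : Nat) : Int) := by
      rw [shiftl_nat_int, shiftl_nat_int, Int.shiftLeft_eq]
      ring
    have hq : PySem.Int.band ((p >>> (2*k) : Nat) : Int) 3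
        = ((2 * (p.testBit (2*k+1)).toNat + (p.testBit (2*k)).toNat : Nat) : Int) := by
      rw [show (3:Int) = ((3:Nat) : Int) from rfl, PySem.Int.band_natCast]
      congr 1
      rw [and_three, mod4_testBit, Nat.testBit_shiftRight, Nat.testBit_shiftRight]
      norm_num
    have hpos' : (((p >>> (2*k) : Nat) : Int)) >>> (2:Nat) = ((p >>> (2*(k+1)) : Nat) : Int) := by
      rw [Int.natCast_shiftRight, Int.natCast_shiftRight, ← Int.shiftRight_add,
        show 2*k + 2 = 2*(k+1) from by omega]
    have hrange : List.range' k (z - k) = k :: List.range' (k+1) (z - (k+1)) := by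
      rw [show z - k = (z - (k+1)) + 1 by omega, List.range'_succ]
    rw [hrange]
    simp only [List.foldl_cons]
    simp only [hrx, hry, hps, hss]
    simp only [quadStep, rotate, hq, hpos']
    cases hb1 : p.testBit (2*k+1) <;> cases hb0 : p.testBit (2*k)
    · norm_num
      exact ih (k+1) y x p (by omega) (by omega)
    · norm_num [Nat.one_shiftLeft]
      have H := ih (k+1) x (y + 2^k) p (by omega) (by omega)
      norm_num [Nat.one_shiftLeft] at H
      exact H
    · norm_num [Nat.one_shiftLeft]
      have H := ih (k+1) (x + 2^k) (y + 2^k) p (by omega) (by omega)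
      norm_num [Nat.one_shiftLeft] at H
      exact H
    · norm_num [Nat.one_shiftLeft]
      have H := ih (k+1) (2 * 2^k - 1 - y) (2^k - 1 - x) p (by omega) (by omega)
      norm_num [Nat.one_shiftLeft] at H
      convert H using 2
      ring_nf

-- the quadrant read by msbDecode at level z+1 on a nonnegative position
theorem msb_q (p : Nat) (n : Nat) :
    PySem.Int.band (((p:Int)) >>> (2 * n : Nat)) 3 = (((p >>> (2*n)) % 4 : Nat) : Int) := by
  rw [show ((p:Int)) >>> (2*n : Nat) = (((p >>> (2*n) : Nat)) : Int) from
      (Int.natCast_shiftRight p (2*n)).symm,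
    show (3:Int) = ((3:Nat) : Int) from rfl, PySem.Int.band_natCast, and_three]

-- how the three non-identity states transform the state-0 decode
theorem msb_state (n : Nat) (p : Nat) :
    msbDecode n p 1 = ((msbDecode n p 0).2, (msbDecode n p 0).1) ∧
    msbDecode n p 2 = (2^n - 1 - (msbDecode n p 0).2, 2^n - 1 - (msbDecode n p 0).1) ∧
    msbDecode n p 3 = (2^n - 1 - (msbDecode n p 0).1, 2^n - 1 - (msbDecode n p 0).2) := by
  induction n with
  | zero => simp [msbDecode]
  | succ n ih =>
    obtain ⟨ih1, ih2, ih3⟩ := ih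
    have hm : (p >>> (2*n)) % 4 = 0 ∨ (p >>> (2*n)) % 4 = 1 ∨
        (p >>> (2*n)) % 4 = 2 ∨ (p >>> (2*n)) % 4 = 3 := by omega
    have hs : ((1:Int) <<< (n:Nat)) = 2 ^ n := by rw [Int.shiftLeft_eq]; ring
    simp only [msbDecode, msb_q]
    rcases hm with h | h | h | h <;>
      simp only [h, Nat.cast_ofNat, Nat.cast_zero, Nat.cast_one, hilTable] <;>
      norm_num [hs, ih1, ih2, ih3, Prod.ext_iff] <;>
      ring_nf <;> trivial

theorem foldl_pos (z : Nat) : ∀ (k : Nat) (st : Int × Int × Int),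
    ((List.range' k z).foldl quadStep st).2.2 = st.2.2 >>> (2 * z : Nat) := by
  induction z with
  | zero => intro k st; simp
  | succ z ih =>
    intro k st
    rw [List.range'_succ, List.foldl_cons, ih]
    have h : (quadStep st k).2.2 = st.2.2 >>> (2:Nat) := by
      simp only [quadStep]
      split_ifs <;> rfl
    rw [h, ← Int.shiftRight_add]
    congr 1
    omega

theorem lsb_eq_msb (z p : Nat) :
    (((List.range' 0 z).foldl quadStep (0, 0, (p:Int))).1,
     ((List.range' 0 z).foldl quadStep (0, 0, (p:Int))).2.1) = msbDecode z p 0 := by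
  induction z with
  | zero => simp [msbDecode]
  | succ z ih =>
    have hr : List.range' 0 (z+1) = List.range' 0 z ++ [z] := by
      simpa using List.range'_1_concat (s := 0) (n := z)
    rw [hr, List.foldl_append, List.foldl_cons, List.foldl_nil]
    set st := (List.range' 0 z).foldl quadStep (0, 0, (p:Int)) with hst
    have hpos : st.2.2 = (((p >>> (2*z) : Nat)) : Int) := by
      rw [hst, foldl_pos, Int.natCast_shiftRight]
    have hq : PySem.Int.band st.2.2 3 = (((p >>> (2*z)) % 4 : Nat) : Int) := by
      rw [hpos, show (3:Int) = ((3:Nat) : Int) from rfl, PySem.Int.band_natCast, and_three]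
    have hm : (p >>> (2*z)) % 4 = 0 ∨ (p >>> (2*z)) % 4 = 1 ∨
        (p >>> (2*z)) % 4 = 2 ∨ (p >>> (2*z)) % 4 = 3 := by omega
    have ihx : st.1 = (msbDecode z p 0).1 := by rw [hst, ← ih]
    have ihy : st.2.1 = (msbDecode z p 0).2 := by rw [hst, ← ih]
    obtain ⟨h1, h2, h3⟩ := msb_state z p
    have hs : ((1:Int) <<< (z:Nat)) = 2 ^ z := by rw [Int.shiftLeft_eq]; ring
    simp only [msbDecode, msb_q, quadStep, hq]
    rcases hm with h | h | h | h <;>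
      simp only [h, Nat.cast_ofNat, Nat.cast_zero, Nat.cast_one, hilTable] <;>
      norm_num [hs, h1, h2, h3, ihx, ihy, Prod.ext_iff] <;>
      (ring_nf; all_goals trivial)

-- ===== VERDICT (by name: the statement is the Claim_ definition above) =====
theorem tileid_to_zxy_spec : Claim_equal_tileid_to_zxy := by
  intro t _hDom hPre
  unfold Spec_tileid_to_zxy
  obtain ⟨ht0, htU⟩ := hPre
  have hub := PySem.Int.lt_two_pow_bitLength (3 * t + 1)
  have hlb := PySem.Int.two_pow_bitLength_le (3 * t + 1) (by omega)
  set L := PySem.Int.bitLength (3 * t + 1) with hLdef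
  have hmc : (((3 * t + 1).natAbs : Nat) : Int) = 3 * t + 1 := Int.natAbs_of_nonneg (by omega)
  have hL1 : 1 ≤ L := by
    by_contra h
    have hL0 : L = 0 := by omega
    rw [hL0, pow_zero] at hub
    omega
  set Z := (L - 1) / 2 with hZdef
  have h2a : 2 ^ (2 * Z) ≤ (3 * t + 1).natAbs :=
    le_trans (Nat.pow_le_pow_right (by norm_num) (by omega)) hlb
  have h2b : (3 * t + 1).natAbs < 2 ^ (2 * Z + 2) :=
    lt_of_lt_of_le hub (Nat.pow_le_pow_right (by norm_num) (by omega))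
  have h4a : (4:Int) ^ Z ≤ 3 * t + 1 := by
    calc (4:Int)^Z = ((2^(2*Z) : Nat) : Int) := by push_cast; rw [pow_mul]; norm_num
    _ ≤ (((3*t+1).natAbs : Nat) : Int) := by exact_mod_cast h2a
    _ = 3*t+1 := hmc
  have h4b : 3 * t + 1 < (4:Int) ^ (Z + 1) := by
    calc (3*t+1 : Int) = (((3*t+1).natAbs : Nat) : Int) := hmc.symm
    _ < ((2^(2*Z+2) : Nat) : Int) := by exact_mod_cast h2b
    _ = 4^(Z+1) := by push_cast; rw [show 2*Z+2 = 2*(Z+1) from by omega, pow_mul]; norm_num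
  have hZ32 : Z < 32 := by
    by_contra h
    have h1 : (4:Int)^32 ≤ 4^Z := pow_le_pow_right₀ (by norm_num) (by omega)
    have h2 : (4:Int)^32 ≤ 3*t+1 := le_trans h1 h4a
    norm_num at h2
    omega
  have hdvd : ∀ n : Nat, (3:Int) ∣ 4^n - 1 := by
    intro n
    induction n with
    | zero => simp
    | succ n ih =>
      have h : (4:Int)^(n+1) - 1 = 4*(4^n - 1) + 3 := by ring
      rw [h]
      exact dvd_add (ih.mul_left 4) ⟨1, by ring⟩
  obtain ⟨a, ha⟩ := hdvd Z
  have ha' : (4:Int)^Z = 3*a + 1 := by omega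
  have haval : ((4:Int)^Z - 1) / 3 = a := by
    rw [ha, Int.mul_ediv_cancel_left a (by norm_num : (3:Int) ≠ 0)]
  have hpos0 : 0 ≤ t - a := by nlinarith [h4a]
  have hz : PySem.Int.floordiv ((L:Int) - 1) 2 = (Z:Int) := by
    rw [show ((L:Int) - 1) = ((L - 1 : Nat) : Int) from by omega]
    exact_mod_cast PySem.Int.floordiv_natCast (L-1) 2
  have hscan : levelScan t 0 0 = (Z, ((4:Int)^Z - 1) / 3) :=
    levelScan_eq t Z h4a h4b Z 0 0 (by omega) (by omega) (by norm_num)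
  simp only [tileid_to_zxy, tileid_to_zxy_alt, hscan]
  rw [← hLdef, hz]
  rw [if_neg (show ¬ (32:Int) ≤ (Z:Int) from by omega)]
  rw [if_neg (show ¬ 32 ≤ Z from by omega)]
  have hpnn : ((t - a).toNat : Int) = t - a := Int.toNat_of_nonneg hpos0
  have hdec := decode_eq Z Z 0 0 0 (t - a).toNat (by omega) (by omega)
  simp only [Nat.mul_zero, Nat.shiftRight_zero, Nat.sub_zero, hpnn, shiftl_nat_int, pow_zero] at hdec
  simp only [Int.toNat_natCast, shiftl_nat_int]
  rw [show ((Z:Int) * 2).toNat = 2 * Z from by omega,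
      show (2:Int)^(2*Z) = 4^Z from by rw [pow_mul]; norm_num,
      PySem.Int.floordiv_eq_ediv_of_pos (by norm_num : (0:Int) < 3), haval, hdec]
  have := lsb_eq_msb Z (t - a).toNat
  rw [hpnn] at this
  rw [show (msbDecode Z (t-a) 0).1 = (((List.range' 0 Z).foldl quadStep (0, 0, t - a)).1,
        ((List.range' 0 Z).foldl quadStep (0, 0, t - a)).2.1).1 from by rw [this],
      show (msbDecode Z (t-a) 0).2 = (((List.range' 0 Z).foldl quadStep (0, 0, t - a)).1,
        ((List.range' 0 Z).foldl quadStep (0, 0, t - a)).2.1).2 from by rw [this]]
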